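-- pv_equiv track=rewrite | github.com/holygio/ML-Seminar_Polymarket-Project | backend/pipeline.py | _normalize_slug_piece
-- ===== SOURCE A (Python) =====
-- from typing import Any, Dict, Iterable, List, Optional
--
-- def _normalize_slug_piece(value: str) -> str:
--     out: List[str] = []
--     prev_dash = False
--     for ch in str(value).lower().strip():
--         if ch.isalnum():
--             out.append(ch)
--             prev_dash = False
--         elif not prev_dash:
--             out.append("-")
--             prev_dash = True
--     return "".join(out).strip("-")
-- ===== SOURCE B (Python) =====
-- from typing import List
--
--
-- def _normalize_slug_piece(value: str) -> str:
--     s = str(value).lower().strip()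
--     parts: List[str] = []
--     i, n = 0, len(s)
--     while i < n:
--         if s[i].isalnum():
--             j = i
--             while j < n and s[j].isalnum():
--                 j += 1
--             parts.append(s[i:j])
--             i = j
--         else:
--             i += 1
--     return "-".join(parts)
-- ===== Notes on version B (the rewrite author's own statement) =====
-- stated objective: alternative
-- what changed: B scans the stripped lowercase string run-by-run, slicing out each maximal alphanumeric run and joining the runs with single dashes, instead of A's char-by-char loop with a prev_dash flag plus a final strip of edge dashes.
import Mathlib
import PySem

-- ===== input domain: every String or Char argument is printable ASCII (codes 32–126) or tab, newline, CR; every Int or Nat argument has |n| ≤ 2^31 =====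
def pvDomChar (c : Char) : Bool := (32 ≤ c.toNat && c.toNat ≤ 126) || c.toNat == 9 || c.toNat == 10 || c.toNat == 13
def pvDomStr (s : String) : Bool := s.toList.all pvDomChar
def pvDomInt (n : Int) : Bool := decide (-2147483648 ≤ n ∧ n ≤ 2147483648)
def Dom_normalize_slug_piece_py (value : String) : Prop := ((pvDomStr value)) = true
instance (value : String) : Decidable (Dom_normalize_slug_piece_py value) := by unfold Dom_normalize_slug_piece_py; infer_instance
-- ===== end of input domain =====

-- B replaces A's char-by-char loop with prev_dash flag and final strip('-') by a run scanner
-- that collects maximal alphanumeric runs and joins them with '-' (alternative decomposition).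


-- ===== PORT A =====
-- the for-loop: out accumulator and prev_dash flag, char by char
def pvLoopA : List Char → List Char → Bool → List Char
  | [], out, _ => out
  | c :: cs, out, prev =>
    if PySem.Chars.isalnum c then pvLoopA cs (out ++ [c]) false
    else if !prev then pvLoopA cs (out ++ ['-']) true
    else pvLoopA cs out prev

def normalize_slug_piece_py (value : String) : String :=
  String.mk (PySem.Chars.stripChars
    (pvLoopA (PySem.Chars.strip (PySem.Chars.lower value.toList)) [] false) ['-'])

-- ===== PORT B =====
-- the outer while loop: on an alnum char slice out the maximal alnum run (inner while =
-- takeWhile/dropWhile), on a non-alnum char advance by one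
def pvRuns : List Char → List (List Char)
  | [] => []
  | c :: cs =>
    if PySem.Chars.isalnum c then
      (c :: cs.takeWhile PySem.Chars.isalnum) :: pvRuns (cs.dropWhile PySem.Chars.isalnum)
    else pvRuns cs
termination_by cs => cs.length
decreasing_by
  · simp only [List.length_cons]
    exact Nat.lt_succ_of_le (List.length_dropWhile_le _ _)
  · simp only [List.length_cons]; omega

def normalize_slug_piece_py_alt (value : String) : String :=
  String.mk (PySem.Chars.join ['-']
    (pvRuns (PySem.Chars.strip (PySem.Chars.lower value.toList))))

-- ===== PRECONDITION & SPEC =====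
def Spec_normalize_slug_piece_py (value : String) (out : String) : Prop := out = normalize_slug_piece_py_alt value
instance (value : String) (out : String) : Decidable (Spec_normalize_slug_piece_py value out) := by unfold Spec_normalize_slug_piece_py; infer_instance

-- ===== CLAIM (what is proved, stated in full; the proofs are below) =====
def Claim_equal_normalize_slug_piece_py : Prop := ∀ (value : String), Dom_normalize_slug_piece_py value → Spec_normalize_slug_piece_py value (normalize_slug_piece_py value)

-- ===== LEMMAS AND PROOFS =====

-- possible leading '-' A emits when the string starts with a non-alnum char
def pvLead (cs : List Char) : List Char :=
  if cs.head?.any PySem.Chars.isalnum then [] else ['-']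

-- possible trailing '-' A emits when the string ends with a non-alnum char
def pvTrail (cs : List Char) : List Char :=
  if cs.getLast?.any PySem.Chars.isalnum then [] else ['-']

lemma pvLoopA_out (cs : List Char) : ∀ (out : List Char) (prev : Bool),
    pvLoopA cs out prev = out ++ pvLoopA cs [] prev := by
  induction cs with
  | nil => intro out prev; simp [pvLoopA]
  | cons c cs ih =>
    intro out prev
    by_cases h : PySem.Chars.isalnum c = true
    · simp only [pvLoopA]
      rw [if_pos h, if_pos h, ih (out ++ [c]), ih ([] ++ [c])]; simp
    · simp only [pvLoopA]
      rw [if_neg h, if_neg h]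
      cases prev with
      | false =>
        simp only [Bool.not_false, if_true]
        rw [ih (out ++ ['-']), ih ([] ++ ['-'])]; simp
      | true =>
        simp only [Bool.not_true]
        rw [if_neg (by simp), if_neg (by simp)]
        exact ih out true

lemma pvRuns_eq_nil_all (cs : List Char) (h : pvRuns cs = []) :
    ∀ c ∈ cs, PySem.Chars.isalnum c = false := by
  induction cs with
  | nil => simp
  | cons c cs ih =>
    by_cases hc : PySem.Chars.isalnum c = true
    · exfalso; rw [pvRuns, if_pos hc] at h; exact List.cons_ne_nil _ _ h
    · rw [pvRuns, if_neg hc] at h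
      intro d hd
      rcases List.mem_cons.mp hd with rfl | hd
      · exact eq_false_of_ne_true hc
      · exact ih h d hd

lemma pvRuns_props (cs : List Char) : ∀ r ∈ pvRuns cs, r ≠ [] ∧ ∀ c ∈ r, PySem.Chars.isalnum c = true := by
  induction cs using pvRuns.induct with
  | case1 => simp [pvRuns]
  | case2 c cs hc ih =>
    rw [pvRuns, if_pos hc]
    intro r hr
    rcases List.mem_cons.mp hr with rfl | hr
    · refine ⟨List.cons_ne_nil _ _, ?_⟩
      intro d hd
      rcases List.mem_cons.mp hd with rfl | hd
      · exact hc
      · exact List.mem_takeWhile_imp hd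
    · exact ih r hr
  | case3 c cs hc ih =>
    rw [pvRuns, if_neg hc]; exact ih

lemma join_head (sep : List Char) (r : List Char) (rs : List (List Char)) (hr : r ≠ []) :
    (PySem.Chars.join sep (r :: rs)).head? = r.head? := by
  cases rs with
  | nil => rw [PySem.Chars.join_singleton]
  | cons r' rs =>
    rw [PySem.Chars.join_cons_cons]
    cases r with
    | nil => exact absurd rfl hr
    | cons a t => simp

lemma join_ne_nil (sep : List Char) (rs : List (List Char)) (h : rs ≠ [])
    (hall : ∀ r ∈ rs, r ≠ []) : PySem.Chars.join sep rs ≠ [] := by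
  cases rs with
  | nil => exact absurd rfl h
  | cons r rs =>
    have hr := hall r (List.mem_cons_self ..)
    intro hj
    have := join_head sep r rs hr
    rw [hj] at this
    cases r with
    | nil => exact hr rfl
    | cons a t => simp at this

lemma join_last (sep : List Char) (rs : List (List Char)) (h : rs ≠ [])
    (hall : ∀ r ∈ rs, r ≠ []) :
    ∃ r ∈ rs, (PySem.Chars.join sep rs).getLast? = r.getLast? := by
  induction rs with
  | nil => exact absurd rfl h
  | cons r rs ih =>
    cases rs with
    | nil => exact ⟨r, List.mem_cons_self .., by rw [PySem.Chars.join_singleton]⟩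
    | cons r' rs' =>
      obtain ⟨r₀, hmem, hlast⟩ := ih (List.cons_ne_nil _ _) (fun x hx => hall x (List.mem_cons_of_mem _ hx))
      refine ⟨r₀, List.mem_cons_of_mem _ hmem, ?_⟩
      rw [PySem.Chars.join_cons_cons, ← hlast]
      have hne : PySem.Chars.join sep (r' :: rs') ≠ [] :=
        join_ne_nil sep _ (List.cons_ne_nil _ _) (fun x hx => hall x (List.mem_cons_of_mem _ hx))
      rw [List.getLast?_append_of_ne_nil _ hne]

lemma alnum_ne_dash (c : Char) (h : PySem.Chars.isalnum c = true) : (c == '-') = false := by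
  cases hcc : c == '-' with
  | false => rfl
  | true =>
    have : c = '-' := eq_of_beq hcc
    subst this
    exact absurd h (by decide)

-- A's raw loop output against B's runs, for both values of prev_dash
lemma pvLoopA_char (cs : List Char) :
    (pvLoopA cs [] true =
      if pvRuns cs = [] then [] else PySem.Chars.join ['-'] (pvRuns cs) ++ pvTrail cs)
    ∧ (pvLoopA cs [] false =
      if pvRuns cs = [] then (if cs = [] then [] else ['-'])
      else pvLead cs ++ PySem.Chars.join ['-'] (pvRuns cs) ++ pvTrail cs) := by
  induction cs with
  | nil => simp [pvLoopA, pvRuns]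
  | cons c cs ih =>
    obtain ⟨ihT, ihF⟩ := ih
    by_cases hc : PySem.Chars.isalnum c = true
    · -- alnum head: both prev states emit c then continue with prev = false
      have hstep : ∀ prev, pvLoopA (c :: cs) [] prev = c :: pvLoopA cs [] false := by
        intro prev
        simp [pvLoopA, hc, pvLoopA_out cs [c] false]
      have hruns : pvRuns (c :: cs) =
          (c :: cs.takeWhile PySem.Chars.isalnum) :: pvRuns (cs.dropWhile PySem.Chars.isalnum) := by
        rw [pvRuns, if_pos hc]
      have hlead : pvLead (c :: cs) = [] := by simp [pvLead, hc]
      have key : c :: pvLoopA cs [] false =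
          PySem.Chars.join ['-'] (pvRuns (c :: cs)) ++ pvTrail (c :: cs) := by
        by_cases hnil : pvRuns cs = []
        · have hallnon := pvRuns_eq_nil_all cs hnil
          cases cs with
          | nil =>
            simp [pvLoopA, pvRuns, hc, PySem.Chars.join_singleton, pvTrail]
          | cons d ds =>
            have hd : PySem.Chars.isalnum d = false := hallnon d (List.mem_cons_self ..)
            have htake : (d :: ds).takeWhile PySem.Chars.isalnum = [] := by
              simp [hd]
            have hdrop : (d :: ds).dropWhile PySem.Chars.isalnum = d :: ds := by
              simp [hd]
            rw [ihF, if_pos hnil, if_neg (List.cons_ne_nil _ _)]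
            rw [hruns, htake, hdrop, hnil, PySem.Chars.join_singleton]
            have hlast : (c :: d :: ds).getLast? = (d :: ds).getLast? := List.getLast?_cons_cons ..
            have hlastnon : PySem.Chars.isalnum ((d :: ds).getLast (List.cons_ne_nil _ _)) = false :=
              hallnon _ (List.getLast_mem _)
            have : pvTrail (c :: d :: ds) = ['-'] := by
              unfold pvTrail
              rw [hlast, List.getLast?_eq_some_getLast (List.cons_ne_nil _ _)]
              simp [hlastnon]
            rw [this]; rfl
        · -- runs cs ≠ []
          have hcs : cs ≠ [] := by
            intro h; rw [h, pvRuns] at hnil; exact hnil rfl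
          rw [ihF, if_neg hnil]
          have htrail : pvTrail (c :: cs) = pvTrail cs := by
            cases cs with
            | nil => exact absurd rfl hcs
            | cons d ds => unfold pvTrail; rw [List.getLast?_cons_cons]
          rw [htrail]
          cases cs with
          | nil => exact absurd rfl hcs
          | cons d ds =>
            by_cases hd : PySem.Chars.isalnum d = true
            · -- run continues: join(runs(c::d::ds)) = c :: join(runs(d::ds))
              have hleadcs : pvLead (d :: ds) = [] := by simp [pvLead, hd]
              have hruns' : pvRuns (d :: ds) =
                  (d :: ds.takeWhile PySem.Chars.isalnum) :: pvRuns (ds.dropWhile PySem.Chars.isalnum) := by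
                rw [pvRuns, if_pos hd]
              have htake : (d :: ds).takeWhile PySem.Chars.isalnum = d :: ds.takeWhile PySem.Chars.isalnum := by
                simp [hd]
              have hdrop : (d :: ds).dropWhile PySem.Chars.isalnum = ds.dropWhile PySem.Chars.isalnum := by
                simp [hd]
              rw [hleadcs, hruns, htake, hdrop, hruns']
              cases hrr : pvRuns (ds.dropWhile PySem.Chars.isalnum) with
              | nil =>
                rw [PySem.Chars.join_singleton, PySem.Chars.join_singleton]; simp
              | cons q qs =>
                rw [PySem.Chars.join_cons_cons, PySem.Chars.join_cons_cons]; simp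
            · -- run breaks at d
              have hleadcs : pvLead (d :: ds) = ['-'] := by simp [pvLead, hd]
              have htake : (d :: ds).takeWhile PySem.Chars.isalnum = [] := by
                simp [hd]
              have hdrop : (d :: ds).dropWhile PySem.Chars.isalnum = d :: ds := by
                simp [hd]
              rw [hleadcs, hruns, htake, hdrop]
              cases hrr : pvRuns (d :: ds) with
              | nil => exact absurd hrr hnil
              | cons q qs =>
                rw [PySem.Chars.join_cons_cons]; simp
      constructor
      · rw [hstep true, if_neg (by rw [hruns]; exact List.cons_ne_nil _ _), key]
      · rw [hstep false, if_neg (by rw [hruns]; exact List.cons_ne_nil _ _), hlead, key]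
        simp
    · -- non-alnum head
      have hc' : PySem.Chars.isalnum c = false := eq_false_of_ne_true hc
      have hruns : pvRuns (c :: cs) = pvRuns cs := by rw [pvRuns, if_neg hc]
      have hT : pvLoopA (c :: cs) [] true = pvLoopA cs [] true := by
        simp [pvLoopA, hc']
      have hF : pvLoopA (c :: cs) [] false = '-' :: pvLoopA cs [] true := by
        simp [pvLoopA, hc', pvLoopA_out cs ['-'] true]
      have htrail : cs ≠ [] → pvTrail (c :: cs) = pvTrail cs := by
        intro h
        cases cs with
        | nil => exact absurd rfl h
        | cons d ds => unfold pvTrail; rw [List.getLast?_cons_cons]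
      constructor
      · rw [hT, ihT, hruns]
        by_cases hnil : pvRuns cs = []
        · simp [hnil]
        · have hcs : cs ≠ [] := by intro h; rw [h, pvRuns] at hnil; exact hnil rfl
          rw [if_neg hnil, if_neg hnil, htrail hcs]
      · rw [hF, ihT, hruns]
        by_cases hnil : pvRuns cs = []
        · simp [hnil]
        · have hcs : cs ≠ [] := by intro h; rw [h, pvRuns] at hnil; exact hnil rfl
          rw [if_neg hnil, if_neg hnil, htrail hcs]
          have : pvLead (c :: cs) = ['-'] := by simp [pvLead, hc']
          rw [this]; simp

-- stripping '-' from lead ++ J ++ trail recovers J when J begins and ends in non-dash chars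
lemma strip_core (J lead trail : List Char)
    (hl : lead = [] ∨ lead = ['-']) (ht : trail = [] ∨ trail = ['-'])
    (hh : ∃ c, J.head? = some c ∧ (c == '-') = false)
    (hg : ∃ c, J.getLast? = some c ∧ (c == '-') = false) :
    PySem.Chars.stripChars (lead ++ J ++ trail) ['-'] = J := by
  obtain ⟨c, hc, hcd⟩ := hh
  obtain ⟨d, hdl, hdd⟩ := hg
  obtain ⟨t, rfl⟩ : ∃ t, J = c :: t := by
    cases J with
    | nil => simp at hc
    | cons a t => simp at hc; exact ⟨t, by rw [hc]⟩
  have hcne : c ≠ '-' := beq_eq_false_iff_ne.mp hcd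
  have hdne : d ≠ '-' := beq_eq_false_iff_ne.mp hdd
  show (List.dropWhile (fun x => ['-'].contains x)
      (List.dropWhile (fun x => ['-'].contains x) (lead ++ c :: t ++ trail)).reverse).reverse
    = c :: t
  have h1 : List.dropWhile (fun x => ['-'].contains x) (lead ++ (c :: t) ++ trail)
      = (c :: t) ++ trail := by
    rcases hl with rfl | rfl
    · simp [hcne]
    · simp [hcne]
  rw [h1]
  obtain ⟨u, hu⟩ : ∃ u, (c :: t).reverse = d :: u := by
    have : (c :: t).reverse.head? = some d := by
      rw [List.head?_reverse]; exact hdl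
    cases hrw : (c :: t).reverse with
    | nil => rw [hrw] at this; simp at this
    | cons a u => rw [hrw] at this; simp at this; exact ⟨u, by rw [this]⟩
  have h2 : List.dropWhile (fun x => ['-'].contains x) (((c :: t) ++ trail).reverse)
      = (c :: t).reverse := by
    rw [List.reverse_append, hu]
    rcases ht with rfl | rfl
    · simp [hdne]
    · simp [hdne]
  rw [h2, List.reverse_reverse]

-- the central char-level equality: A's whole pipeline after lower/strip equals B's
lemma main_chars (cs : List Char) :
    PySem.Chars.stripChars (pvLoopA cs [] false) ['-']
      = PySem.Chars.join ['-'] (pvRuns cs) := by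
  have hF := (pvLoopA_char cs).2
  by_cases hnil : pvRuns cs = []
  · rw [hF, if_pos hnil, hnil, PySem.Chars.join_nil]
    by_cases hcs : cs = []
    · rw [if_pos hcs]; decide
    · rw [if_neg hcs]; decide
  · rw [hF, if_neg hnil]
    have hprops := pvRuns_props cs
    cases hrr : pvRuns cs with
    | nil => exact absurd hrr hnil
    | cons r rs =>
      have hr : r ≠ [] := (hprops r (by rw [hrr]; exact List.mem_cons_self ..)).1
      have hhead : ∃ c, (PySem.Chars.join ['-'] (pvRuns cs)).head? = some c ∧ (c == '-') = false := by
        rw [hrr, join_head _ r rs hr]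
        cases r with
        | nil => exact absurd rfl hr
        | cons a t =>
          refine ⟨a, by simp, alnum_ne_dash a ?_⟩
          exact (hprops _ (by rw [hrr]; exact List.mem_cons_self ..)).2 a (List.mem_cons_self ..)
      have hlast : ∃ c, (PySem.Chars.join ['-'] (pvRuns cs)).getLast? = some c ∧ (c == '-') = false := by
        obtain ⟨r₀, hm, hl⟩ := join_last ['-'] (pvRuns cs) hnil (fun x hx => (hprops x hx).1)
        have hr₀ : r₀ ≠ [] := (hprops r₀ hm).1
        refine ⟨r₀.getLast hr₀, by rw [hl, List.getLast?_eq_some_getLast hr₀], ?_⟩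
        exact alnum_ne_dash _ ((hprops r₀ hm).2 _ (List.getLast_mem hr₀))
      rw [hrr] at hhead hlast
      refine strip_core _ _ _ ?_ ?_ hhead hlast
      · unfold pvLead; split <;> simp
      · unfold pvTrail; split <;> simp

-- ===== VERDICT (by name: the statement is the Claim_ definition above) =====
theorem normalize_slug_piece_py_spec : Claim_equal_normalize_slug_piece_py := by
  intro value _
  unfold Spec_normalize_slug_piece_py normalize_slug_piece_py normalize_slug_piece_py_alt
  rw [main_chars]
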